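-- pv_equiv track=rewrite | github.com/Summer142857/LLMCoSolver | Envs/MISEnv/MISEnv.py | compute_top_k_neighbors_by_degree
-- ===== SOURCE A (Python) =====
-- def compute_top_k_neighbors_by_degree(num_nodes, edges, k=3):
--     """
--     Compute for each node up to k neighbors sorted by descending neighbor-degree.
--
--     Returns
--     -------
--     top_k_for_each: dict[int, list[tuple[int,int]]]
--         A dictionary keyed by node i, whose value is a list of (neighbor, neighbor_degree).
--     """
--     # 1) Build adjacency list
--     adjacency_list = {i: [] for i in range(num_nodes)}
--     for (u, v) in edges:
--         adjacency_list[u].append(v)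
--         adjacency_list[v].append(u)
--
--     # 2) Compute degrees
--     degrees = [len(adjacency_list[i]) for i in range(num_nodes)]
--
--     # 3) For each node, sort neighbors by descending degree and take top-k
--     top_k_for_each = {}
--     for i in range(num_nodes):
--         # List of (nbr, degree_of_nbr)
--         neighbor_degs = [(nbr, degrees[nbr]) for nbr in adjacency_list[i]]
--         neighbor_degs.sort(key=lambda x: x[1], reverse=True)
--         top_k_for_each[i] = neighbor_degs[:k]
--     return top_k_for_each
-- ===== SOURCE B (Python) =====
-- def compute_top_k_neighbors_by_degree(num_nodes, edges, k=3):
--     """Array-based variant: adjacency kept as an indexed list of lists (not a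
--     dict), degrees obtained by mapping len over it, iteration via enumerate,
--     and the per-node stable descending order produced by grouping neighbors
--     into degree-keyed buckets read from the largest key down (each bucket
--     preserves adjacency order, so this equals the stable reverse sort)."""
--     adjacency = [[] for _ in range(num_nodes)]
--     for (u, v) in edges:
--         adjacency[u].append(v)
--         adjacency[v].append(u)
--     degrees = [len(nbrs) for nbrs in adjacency]
--     result = {}
--     for i, nbrs in enumerate(adjacency):
--         buckets = {}
--         for nbr in nbrs:
--             dg = degrees[nbr]
--             if dg in buckets:
--                 buckets[dg].append((nbr, dg))
--             else:
--                 buckets[dg] = [(nbr, dg)]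
--         ordered = []
--         for dg in sorted(buckets, reverse=True):
--             ordered.extend(buckets[dg])
--         result[i] = ordered[:k]
--     return result
-- ===== Notes on version B (the rewrite author's own statement) =====
-- stated objective: alternative
-- what changed: Adjacency is kept as an indexed list of lists instead of a dict, degrees come from mapping len over it, nodes are walked with enumerate, and the per-node stable reverse comparison sort is replaced by grouping neighbors into degree-keyed buckets (preserving adjacency order) and concatenating the buckets from the largest degree key down.
import Mathlib
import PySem

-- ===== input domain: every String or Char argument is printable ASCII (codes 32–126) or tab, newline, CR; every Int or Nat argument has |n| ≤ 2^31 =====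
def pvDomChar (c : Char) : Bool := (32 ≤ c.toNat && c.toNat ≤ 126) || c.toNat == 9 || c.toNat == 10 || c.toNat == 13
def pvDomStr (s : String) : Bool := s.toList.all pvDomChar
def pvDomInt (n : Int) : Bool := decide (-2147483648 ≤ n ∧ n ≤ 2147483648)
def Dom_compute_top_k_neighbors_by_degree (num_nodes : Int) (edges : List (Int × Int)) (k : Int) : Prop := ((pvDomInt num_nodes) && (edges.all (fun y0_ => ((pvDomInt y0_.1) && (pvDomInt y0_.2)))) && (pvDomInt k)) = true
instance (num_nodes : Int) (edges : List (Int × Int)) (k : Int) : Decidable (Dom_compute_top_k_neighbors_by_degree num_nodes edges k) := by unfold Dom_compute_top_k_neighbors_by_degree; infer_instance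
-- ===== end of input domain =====

-- B keeps adjacency as an indexed list of lists (not a dict), takes degrees by mapping len,
-- walks nodes with enumerate, and replaces A's per-node stable reverse comparison sort by
-- degree-keyed buckets read in descending key order (objective: alternative algorithm).

-- ===== PORT A =====
def compute_top_k_neighbors_by_degree (num_nodes : Int) (edges : List (Int × Int)) (k : Int) : List (Int × List (Int × Int)) :=
  -- adjacency_list = {i: [] for i in range(num_nodes)}; then append both endpoints.
  -- adjacency_list[u].append(v) raises KeyError when u is not a key: excluded by Pre_;
  -- on Pre_ every endpoint is a key, so Dict.modify with default [] is exact.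
  let adjacency0 : PySem.Dict Int (List Int) :=
    (PySem.List.pyRange 0 num_nodes 1).foldl (fun d i => d.insert i []) PySem.Dict.empty
  let adjacency : PySem.Dict Int (List Int) :=
    edges.foldl (fun d uv =>
      (d.modify uv.1 [] (fun l => l ++ [uv.2])).modify uv.2 [] (fun l => l ++ [uv.1])) adjacency0
  -- degrees = [len(adjacency_list[i]) for i in range(num_nodes)]
  let degrees : List Int :=
    (PySem.List.pyRange 0 num_nodes 1).map (fun i => PySem.List.len (adjacency.getD i []))
  -- per node: sort (nbr, degrees[nbr]) by degree descending (stable), take [:k]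
  -- degrees[nbr] is in range on Pre_, so pyGetD with default 0 is exact there.
  let top : PySem.Dict Int (List (Int × Int)) :=
    (PySem.List.pyRange 0 num_nodes 1).foldl (fun acc i =>
      let neighbor_degs := (adjacency.getD i []).map (fun nbr => (nbr, PySem.List.pyGetD degrees nbr 0))
      acc.insert i (PySem.List.slice (PySem.List.sorted neighbor_degs (fun x => x.2) true) none (some k)))
      PySem.Dict.empty
  top.items

-- ===== PORT B =====
def compute_top_k_neighbors_by_degree_alt (num_nodes : Int) (edges : List (Int × Int)) (k : Int) : List (Int × List (Int × Int)) :=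
  -- adjacency = [[] for _ in range(num_nodes)]
  let adjacency0 : List (List Int) := (PySem.List.pyRange 0 num_nodes 1).map (fun _ => [])
  -- adjacency[u].append(v); adjacency[v].append(u): an in-place append at an index is
  -- exactly 'set index u to old ++ [v]'; Python list indexing raises IndexError when the
  -- index is out of range (excluded by Pre_), where pySetD/pyGetD are exact.
  let adjacency : List (List Int) :=
    edges.foldl (fun a uv =>
      let a1 := PySem.List.pySetD a uv.1 (PySem.List.pyGetD a uv.1 [] ++ [uv.2])
      PySem.List.pySetD a1 uv.2 (PySem.List.pyGetD a1 uv.2 [] ++ [uv.1])) adjacency0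
  -- degrees = [len(nbrs) for nbrs in adjacency]
  let degrees : List Int := adjacency.map PySem.List.len
  -- for i, nbrs in enumerate(adjacency): bucket nbrs by degree (if dg in buckets: append;
  -- else: fresh singleton — exactly Dict.modify with default []), then read the bucket
  -- keys from the largest down and take [:k]
  let result : PySem.Dict Int (List (Int × Int)) :=
    (PySem.List.enumerate adjacency 0).foldl (fun acc p =>
      let buckets : PySem.Dict Int (List (Int × Int)) :=
        p.2.foldl (fun b nbr =>
          let dg := PySem.List.pyGetD degrees nbr 0
          b.modify dg [] (fun l => l ++ [(nbr, dg)])) PySem.Dict.empty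
      let ordered := (PySem.List.sorted buckets.keys (fun d => d) true).foldl
          (fun acc2 dg => acc2 ++ buckets.getD dg []) []
      acc.insert p.1 (PySem.List.slice ordered none (some k))) PySem.Dict.empty
  result.items

-- ===== PRECONDITION & SPEC =====
-- Pre_ excludes exactly the edges with an endpoint outside range(num_nodes), on which the Python A
-- raises KeyError while building the adjacency dict.
def Pre_compute_top_k_neighbors_by_degree (num_nodes : Int) (edges : List (Int × Int)) (k : Int) : Prop :=
  ∀ uv ∈ edges, 0 ≤ uv.1 ∧ uv.1 < num_nodes ∧ 0 ≤ uv.2 ∧ uv.2 < num_nodes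
instance (num_nodes : Int) (edges : List (Int × Int)) (k : Int) : Decidable (Pre_compute_top_k_neighbors_by_degree num_nodes edges k) := by unfold Pre_compute_top_k_neighbors_by_degree; infer_instance

def pvWitness_compute_top_k_neighbors_by_degree : Int × (List (Int × Int)) × Int := (3, [(0, 1), (1, 2), (0, 2)], 2)

def Spec_compute_top_k_neighbors_by_degree (num_nodes : Int) (edges : List (Int × Int)) (k : Int) (out : List (Int × List (Int × Int))) : Prop := out = compute_top_k_neighbors_by_degree_alt num_nodes edges k
instance (num_nodes : Int) (edges : List (Int × Int)) (k : Int) (out : List (Int × List (Int × Int))) : Decidable (Spec_compute_top_k_neighbors_by_degree num_nodes edges k out) := by unfold Spec_compute_top_k_neighbors_by_degree; infer_instance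

-- ===== CLAIM (what is proved, stated in full; the proofs are below) =====
def Claim_equal_compute_top_k_neighbors_by_degree : Prop := ∀ (num_nodes : Int) (edges : List (Int × Int)) (k : Int), Dom_compute_top_k_neighbors_by_degree num_nodes edges k → Pre_compute_top_k_neighbors_by_degree num_nodes edges k → Spec_compute_top_k_neighbors_by_degree num_nodes edges k (compute_top_k_neighbors_by_degree num_nodes edges k)

-- ===== LEMMAS AND PROOFS =====

-- inserting past a prefix that the predicate skips
theorem pv_insertBy_append {α : Type} (before : α → α → Bool) (x : α) (A B : List α)
    (h : ∀ y ∈ A, before x y = false) :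
    PySem.List.insertBy before x (A ++ B) = A ++ PySem.List.insertBy before x B := by
  induction A with
  | nil => simp
  | cons a t ih =>
    have ha : before x a = false := h a (by simp)
    simp only [List.cons_append, PySem.List.insertBy, ha, Bool.false_eq_true, if_false]
    simp [ih (fun y hy => h y (by simp [hy]))]

-- sorted over a snoc is one insertion into the sorted prefix
theorem pv_sorted_rev_snoc {α : Type} (f : α → Int) (ys : List α) (x : α) :
    PySem.List.sorted (ys ++ [x]) f true
      = PySem.List.insertBy (fun a b => decide (f b < f a)) x (PySem.List.sorted ys f true) := by
  rw [PySem.List.sorted_rev_eq_foldl_insertBy, PySem.List.sorted_rev_eq_foldl_insertBy,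
    List.foldl_append]
  rfl

-- a stable reverse sort lists the maximal-key elements first, in input order
theorem pv_sorted_rev_split_max {α : Type} (f : α → Int) (M : Int) :
    ∀ (xs : List α), (∀ x ∈ xs, f x ≤ M) →
    PySem.List.sorted xs f true =
      xs.filter (fun x => f x == M) ++ PySem.List.sorted (xs.filter (fun x => !(f x == M))) f true := by
  intro xs
  induction xs using List.reverseRecOn with
  | nil => intro _; rfl
  | append_singleton ys x ih =>
    intro h
    have hys : ∀ y ∈ ys, f y ≤ M := fun y hy => h y (by simp [hy])
    have hx : f x ≤ M := h x (by simp)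
    rw [pv_sorted_rev_snoc, ih hys]
    by_cases hM : f x = M
    · rw [pv_insertBy_append]
      · have hins : PySem.List.insertBy (fun a b => decide (f b < f a)) x
            (PySem.List.sorted (ys.filter (fun y => !(f y == M))) f true)
            = x :: PySem.List.sorted (ys.filter (fun y => !(f y == M))) f true := by
          cases hB : PySem.List.sorted (ys.filter (fun y => !(f y == M))) f true with
          | nil => rfl
          | cons b t =>
            have hbmem : b ∈ ys.filter (fun y => !(f y == M)) := by
              rw [← PySem.List.mem_sorted (ys.filter (fun y => !(f y == M))) f true]
              simp [hB]
            have hbne : ¬ (f b = M) := by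
              have := (List.mem_filter.mp hbmem).2; simpa using this
            have hblt : f b < f x := lt_of_le_of_ne (hM ▸ hys b (List.mem_filter.mp hbmem).1) (hM ▸ hbne)
            simp [PySem.List.insertBy, hblt]
        rw [hins]
        have hfilt1 : (ys ++ [x]).filter (fun y => f y == M) = ys.filter (fun y => f y == M) ++ [x] := by
          simp [List.filter_append, hM]
        have hfilt2 : (ys ++ [x]).filter (fun y => !(f y == M)) = ys.filter (fun y => !(f y == M)) := by
          simp [List.filter_append, hM]
        rw [hfilt1, hfilt2, List.append_assoc]
        rfl
      · intro y hy
        have : f y = M := by have := (List.mem_filter.mp hy).2; simpa using this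
        simp [this, hM]
    · rw [pv_insertBy_append]
      · rw [← pv_sorted_rev_snoc]
        have hfilt1 : (ys ++ [x]).filter (fun y => f y == M) = ys.filter (fun y => f y == M) := by
          simp [List.filter_append, hM]
        have hfilt2 : (ys ++ [x]).filter (fun y => !(f y == M))
            = ys.filter (fun y => !(f y == M)) ++ [x] := by
          simp [List.filter_append, hM]
        rw [hfilt1, hfilt2]
      · intro y hy
        have : f y = M := by have := (List.mem_filter.mp hy).2; simpa using this
        have : ¬ (f y < f x) := by rw [this]; exact not_lt.mpr hx
        simpa using this

-- concatenating the filters along any strictly descending key list IS the stable reverse sort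
theorem pv_flatMap_filter_eq_sorted_rev {α : Type} (f : α → Int) :
    ∀ (D : List Int) (xs : List α), D.Pairwise (fun a b => b < a) → (∀ x ∈ xs, f x ∈ D) →
    D.flatMap (fun d => xs.filter (fun x => f x == d)) = PySem.List.sorted xs f true := by
  intro D
  induction D with
  | nil =>
    intro xs _ hmem
    cases xs with
    | nil => rfl
    | cons a t => exact absurd (hmem a (by simp)) (by simp)
  | cons d D' ih =>
    intro xs hpw hmem
    obtain ⟨hd, hpw'⟩ := List.pairwise_cons.mp hpw
    have hle : ∀ x ∈ xs, f x ≤ d := by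
      intro x hx
      rcases List.mem_cons.mp (hmem x hx) with h | h
      · exact le_of_eq h
      · exact le_of_lt (hd _ h)
    rw [pv_sorted_rev_split_max f d xs hle, List.flatMap_cons]
    congr 1
    have hcongr : ∀ d' ∈ D', xs.filter (fun x => f x == d')
        = (xs.filter (fun x => !(f x == d))).filter (fun x => f x == d') := by
      intro d' hd'
      rw [List.filter_filter]
      apply List.filter_congr
      intro x _
      by_cases hx : f x = d'
      · have : ¬ (f x = d) := by rw [hx]; exact ne_of_lt (hd _ hd')
        simp only [hx]
        simp
        exact ne_of_lt (hd _ hd')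
      · simp [hx]
    rw [List.flatMap_congr hcongr]
    apply ih _ hpw'
    intro x hx
    have hx1 := (List.mem_filter.mp hx).1
    have hx2 : ¬ (f x = d) := by have := (List.mem_filter.mp hx).2; simpa using this
    rcases List.mem_cons.mp (hmem x hx1) with h | h
    · exact absurd h hx2
    · exact h

-- per-node core: B's bucket read-out equals A's stable reverse sort
theorem pv_pernode (xs : List (Int × Int)) :
    (PySem.List.sorted (xs.foldl (fun b x => b.modify x.2 [] (fun l => l ++ [x]))
        PySem.Dict.empty).keys (fun d => d) true).foldl
      (fun acc2 d => acc2 ++ (xs.foldl (fun b x => b.modify x.2 [] (fun l => l ++ [x]))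
        PySem.Dict.empty).getD d []) []
    = PySem.List.sorted xs (fun x => x.2) true := by
  set B := xs.foldl (fun b x => b.modify x.2 [] (fun l => l ++ [x])) PySem.Dict.empty with hB
  have hkeys_nodup : B.keys.Nodup := by
    rw [hB]
    exact PySem.Dict.nodup_keys_foldl_modify_key xs (fun x => x.2) [] (fun _ x => fun l => l ++ [x])
      PySem.Dict.empty PySem.Dict.nodup_keys_empty
  have hkeys_mem : ∀ y : Int, y ∈ B.keys ↔ y ∈ xs.map (fun x => x.2) := by
    intro y
    rw [hB, PySem.Dict.keys_foldl_modify_key xs (fun x => x.2) [] (fun _ x => fun l => l ++ [x])]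
    have : (PySem.Dict.empty : PySem.Dict Int (List (Int × Int))).keys = [] := rfl
    rw [this, PySem.Set.update_nil_left, PySem.Set.mem_ofList]
  set D := PySem.List.sorted B.keys (fun d => d) true with hD
  have hD_nodup : D.Nodup := ((PySem.List.sorted_perm B.keys (fun d => d) true).symm).nodup hkeys_nodup
  have hD_pw : D.Pairwise (fun a b => b < a) := by
    have h1 : D.Pairwise (fun a b : Int => b ≤ a) := PySem.List.sorted_pairwise_rev B.keys (fun d => d)
    have h2 : D.Pairwise (fun a b : Int => a ≠ b) := hD_nodup
    exact (h1.and h2).imp (fun h => lt_of_le_of_ne h.1 (Ne.symm h.2))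
  have hgetD : ∀ d, B.getD d [] = xs.filter (fun x => x.2 == d) := by
    intro d
    rw [hB]
    have h0 : xs.foldl (fun b x => b.modify x.2 [] (fun l => l ++ [x])) PySem.Dict.empty
        = (xs.map (fun x => (x.2, x))).foldl (fun b p => b.modify p.1 [] (fun l => l ++ [p.2]))
            PySem.Dict.empty := by rw [List.foldl_map]
    rw [h0, PySem.Dict.getD_foldl_modify_append]
    simp [List.filter_map, Function.comp_def, PySem.Dict.getD_empty]
  calc D.foldl (fun acc2 d => acc2 ++ B.getD d []) []
      = [] ++ D.flatMap (fun d => B.getD d []) := PySem.List.foldl_append_eq_flatMap _ D []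
    _ = D.flatMap (fun d => xs.filter (fun x => x.2 == d)) := by
        rw [List.nil_append]; exact List.flatMap_congr (fun d _ => hgetD d)
    _ = PySem.List.sorted xs (fun x => x.2) true := by
        apply pv_flatMap_filter_eq_sorted_rev (fun x => x.2) D xs hD_pw
        intro x hx
        rw [hD, PySem.List.mem_sorted, hkeys_mem]
        exact List.mem_map_of_mem hx

-- writing at an in-range index of a range-comprehension list is a pointwise if
theorem pv_setD_map_range (n u : Int) (g : Int → List Int) (w : List Int)
    (h0 : 0 ≤ u) (h1 : u < n) :
    PySem.List.pySetD ((PySem.List.pyRange 0 n 1).map g) u w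
      = (PySem.List.pyRange 0 n 1).map (fun i => if i = u then w else g i) := by
  rw [PySem.List.pySetD_of_nonneg _ _ h0]
  apply List.ext_getElem
  · simp
  · intro j hj hj'
    simp only [List.getElem_set, List.getElem_map, PySem.List.getElem_pyRange_one]
    rcases eq_or_ne (j : Int) u with hju | hju
    · have h1 : u.toNat = j := by omega
      simp [h1, hju]
    · have h1 : u.toNat ≠ j := by omega
      simp [h1, hju]


-- every key of the initial comprehension dict maps (with default []) to []
theorem pv_getD_init_nil (l : List Int) (d : PySem.Dict Int (List Int))
    (h : ∀ x : Int, d.getD x [] = []) (x : Int) :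
    (l.foldl (fun d i => d.insert i ([] : List Int)) d).getD x [] = [] := by
  induction l generalizing d with
  | nil => exact h x
  | cons a t ih =>
    simp only [List.foldl_cons]
    exact ih _ (fun y => by rw [PySem.Dict.getD_insert]; split <;> simp [h])

-- the indexed-array adjacency equals, entrywise over range(num_nodes), the dict adjacency
theorem pv_adj_inv (n : Int) :
    ∀ (es : List (Int × Int)) (D : PySem.Dict Int (List Int)) (L : List (List Int)),
    (∀ uv ∈ es, 0 ≤ uv.1 ∧ uv.1 < n ∧ 0 ≤ uv.2 ∧ uv.2 < n) →
    L = (PySem.List.pyRange 0 n 1).map (fun i => D.getD i []) →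
    es.foldl (fun a uv =>
        let a1 := PySem.List.pySetD a uv.1 (PySem.List.pyGetD a uv.1 [] ++ [uv.2])
        PySem.List.pySetD a1 uv.2 (PySem.List.pyGetD a1 uv.2 [] ++ [uv.1])) L
      = (PySem.List.pyRange 0 n 1).map (fun i =>
          (es.foldl (fun d uv =>
            (d.modify uv.1 [] (fun l => l ++ [uv.2])).modify uv.2 [] (fun l => l ++ [uv.1])) D).getD i []) := by
  intro es
  induction es with
  | nil => intro D L _ hL; simpa using hL
  | cons uv t ih =>
    intro D L hmem hL
    obtain ⟨hu0, hu1, hv0, hv1⟩ := hmem uv (by simp)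
    simp only [List.foldl_cons]
    apply ih _ _ (fun e he => hmem e (by simp [he]))
    subst hL
    rw [PySem.List.pyGetD_map_pyRange_of_nonneg _ n uv.1 _ hu0 hu1,
      pv_setD_map_range n uv.1 _ _ hu0 hu1,
      PySem.List.pyGetD_map_pyRange_of_nonneg _ n uv.2 _ hv0 hv1,
      pv_setD_map_range n uv.2 _ _ hv0 hv1]
    apply List.map_congr_left
    intro i _
    simp only [PySem.Dict.getD_modify]

-- range over the (cast) length of the array adjacency is range over num_nodes
theorem pv_range_len (n : Int) (L : List (List Int))
    (h : L.length = (PySem.List.pyRange 0 n 1).length) :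
    PySem.List.pyRange 0 (PySem.List.len L) 1 = PySem.List.pyRange 0 n 1 := by
  rw [PySem.List.len_eq, h, PySem.List.length_pyRange_one]
  rw [PySem.List.pyRange_one, PySem.List.pyRange_one]
  have : ((((n - 0).toNat : Int)) - 0).toNat = (n - 0).toNat := by omega
  rw [this]

-- ===== VERDICT (by name: the statement is the Claim_ definition above) =====
theorem compute_top_k_neighbors_by_degree_spec : Claim_equal_compute_top_k_neighbors_by_degree := by
  intro num_nodes edges k _ hpre
  unfold Spec_compute_top_k_neighbors_by_degree
  unfold compute_top_k_neighbors_by_degree compute_top_k_neighbors_by_degree_alt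
  dsimp only
  -- names for the two adjacency structures
  set R := PySem.List.pyRange 0 num_nodes 1 with hR
  set Dadj := edges.foldl (fun d uv =>
      (d.modify uv.1 [] (fun l => l ++ [uv.2])).modify uv.2 [] (fun l => l ++ [uv.1]))
    (R.foldl (fun d i => d.insert i []) PySem.Dict.empty) with hDadj
  set Ladj := edges.foldl (fun a uv =>
      let a1 := PySem.List.pySetD a uv.1 (PySem.List.pyGetD a uv.1 [] ++ [uv.2])
      PySem.List.pySetD a1 uv.2 (PySem.List.pyGetD a1 uv.2 [] ++ [uv.1]))
    (R.map (fun _ => [])) with hLadj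
  -- the array adjacency is the dict adjacency read over range(num_nodes)
  have hAdj : Ladj = R.map (fun i => Dadj.getD i []) := by
    rw [hLadj, hDadj, hR]
    apply pv_adj_inv num_nodes edges _ _ hpre
    apply List.map_congr_left
    intro i _
    rw [pv_getD_init_nil R _ (fun x => PySem.Dict.getD_empty x []) i]
  -- the two degrees lists coincide
  have hdeg : Ladj.map PySem.List.len = R.map (fun i => PySem.List.len (Dadj.getD i [])) := by
    rw [hAdj, List.map_map]; rfl
  rw [hdeg]
  set degrees := R.map (fun i => PySem.List.len (Dadj.getD i [])) with hdegs
  -- enumerate over the array = range over num_nodes paired with the dict entries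
  have hlen : Ladj.length = R.length := by rw [hAdj, List.length_map]
  have henum : PySem.List.enumerate Ladj 0
      = R.map (fun j => (j, Dadj.getD j [])) := by
    rw [PySem.List.enumerate_eq_map_pyRange Ladj ([] : List Int), pv_range_len num_nodes Ladj hlen, ← hR]
    apply List.map_congr_left
    intro j hj
    have hjb := (PySem.List.mem_pyRange_one).mp (hR ▸ hj)
    rw [hAdj, PySem.List.pyGetD_map_pyRange_of_nonneg _ num_nodes j _ (by omega) (by omega)]
  rw [henum, List.foldl_map]
  congr 1
  apply PySem.List.foldl_congr_mem
  intro acc i _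
  dsimp only
  congr 1
  -- per node: bucket read-out = stable reverse sort
  have hfold : (Dadj.getD i []).foldl (fun b nbr =>
        b.modify (PySem.List.pyGetD degrees nbr 0) []
          (fun l => l ++ [(nbr, PySem.List.pyGetD degrees nbr 0)])) PySem.Dict.empty
      = ((Dadj.getD i []).map (fun nbr => (nbr, PySem.List.pyGetD degrees nbr 0))).foldl
          (fun b x => b.modify x.2 [] (fun l => l ++ [x])) PySem.Dict.empty := by
    rw [List.foldl_map]
  rw [hfold]
  rw [pv_pernode ((Dadj.getD i []).map (fun nbr => (nbr, PySem.List.pyGetD degrees nbr 0)))]
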